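-- pv_equiv track=rewrite | github.com/chungnick/college-craft-activities | valid_dates.py | choose_links_heuristic
-- ===== SOURCE A (Python) =====
-- from typing import Any, Dict, Iterable, List, Optional, Tuple
--
-- def _score_link_candidate(text: str, url: str) -> int:
--     """
--     Heuristic scoring to surface likely "apply / deadline / dates" pages.
--     """
--     s = 0
--     hay = f"{text} {url}".lower()
--     for kw in (
--         "apply",
--         "application",
--         "deadline",
--         "dates",
--         "session",
--         "schedule",
--         "calendar",
--         "tuition",
--         "cost",
--         "fees",
--         "eligibility",
--         "requirements",
--         "admissions",
--         "how to apply",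
--     ):
--         if kw in hay:
--             s += 5
--     if "pdf" in hay:
--         s -= 2
--     return s
--
-- def choose_links_heuristic(
--     candidates: List[Dict[str, str]],
--     base_url: str,
--     max_links: int,
-- ) -> List[Dict[str, str]]:
--     """
--     If Gemini selects nothing (or link text is sparse), fall back to heuristic picks.
--     """
--     scored = []
--     for c in candidates:
--         u = (c.get("url") or "").strip()
--         if not u:
--             continue
--         # Avoid self / obvious social links
--         if u.rstrip("/") == (base_url or "").rstrip("/"):
--             continue
--         score = _score_link_candidate(c.get("text", ""), u)
--         if score <= 0:
--             continue
--         scored.append((score, c))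
--     scored.sort(key=lambda x: x[0], reverse=True)
--     out: List[Dict[str, str]] = []
--     for _s, c in scored:
--         if len(out) >= max_links:
--             break
--         out.append({"url": c.get("url", ""), "label": c.get("text", "")})
--     return out
-- ===== SOURCE B (Python) =====
-- # B: bucket-select by score (scores are bounded in 1..70) instead of sort+truncate.
-- KEYWORDS = (
--     "apply", "application", "deadline", "dates", "session", "schedule",
--     "calendar", "tuition", "cost", "fees", "eligibility", "requirements",
--     "admissions", "how to apply",
-- )
--
-- def _score_link_candidate(text: str, url: str) -> int:
--     hay = f"{text} {url}".lower()
--     return sum(5 for kw in KEYWORDS if kw in hay) - (2 if "pdf" in hay else 0)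
--
-- def choose_links_heuristic(candidates, base_url, max_links):
--     # A keyword score is at most 14*5 = 70 and only positive scores are kept,
--     # so a fixed array of buckets indexed by score replaces the sort.
--     buckets = [[] for _ in range(71)]
--     base = (base_url or "").rstrip("/")
--     for c in candidates:
--         u = (c.get("url") or "").strip()
--         if not u:
--             continue
--         if u.rstrip("/") == base:
--             continue
--         s = _score_link_candidate(c.get("text", ""), u)
--         if s > 0:
--             buckets[s].append({"url": c.get("url", ""), "label": c.get("text", "")})
--     ranked = []
--     for s in range(70, 0, -1):
--         ranked.extend(buckets[s])
--     return ranked[:max(0, max_links)]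
-- ===== Notes on version B (the rewrite author's own statement) =====
-- stated objective: alternative
-- what changed: Replaces the sort-then-truncate tail with bucket selection: keyword scores are bounded in 1..70, so kept candidates are dropped into a fixed array of score buckets and the output is read off from bucket 70 down to 1, truncated to max_links; this removes the O(n log n) comparison sort.
import Mathlib
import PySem

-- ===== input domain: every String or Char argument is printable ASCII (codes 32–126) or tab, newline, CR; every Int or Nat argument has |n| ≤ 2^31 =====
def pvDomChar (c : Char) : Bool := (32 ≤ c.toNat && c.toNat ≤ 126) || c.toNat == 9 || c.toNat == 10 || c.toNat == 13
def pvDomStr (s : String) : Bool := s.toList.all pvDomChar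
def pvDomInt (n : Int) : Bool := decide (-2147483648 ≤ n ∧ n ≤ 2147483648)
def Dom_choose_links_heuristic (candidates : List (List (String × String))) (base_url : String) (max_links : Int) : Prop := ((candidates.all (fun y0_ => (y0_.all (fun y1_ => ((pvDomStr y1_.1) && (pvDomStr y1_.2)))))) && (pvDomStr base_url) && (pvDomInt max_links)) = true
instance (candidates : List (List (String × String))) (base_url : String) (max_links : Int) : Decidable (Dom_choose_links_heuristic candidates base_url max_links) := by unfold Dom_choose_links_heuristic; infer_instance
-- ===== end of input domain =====

-- B replaces A's sort-then-truncate with bucket selection over the bounded score range 1..70; same filtering, same output.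

-- ===== PORT A =====
def pvKeywords : List String :=
  ["apply", "application", "deadline", "dates", "session", "schedule", "calendar",
   "tuition", "cost", "fees", "eligibility", "requirements", "admissions", "how to apply"]

-- c.get(k, d) / (c.get(k) or d) on a string-valued dict: first match in the association list
def pvGetD (c : List (String × String)) (k d : String) : String :=
  match c.lookup k with | some v => v | none => d

-- exact port of str.rstrip("/"): drop trailing '/' characters
def pvRstripSlash (s : List Char) : List Char :=
  (s.reverse.dropWhile (fun ch => ch == '/')).reverse

def score_link_candidate (text url : List Char) : Int :=
  let hay := PySem.Chars.lower (text ++ [' '] ++ url)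
  let s := pvKeywords.foldl (fun s kw => if PySem.Chars.isIn kw.toList hay then s + 5 else s) (0 : Int)
  if PySem.Chars.isIn ['p', 'd', 'f'] hay then s - 2 else s

-- {"url": c.get("url",""), "label": c.get("text","")}
def pvMkOut (c : List (String × String)) : List (String × String) :=
  [("url", pvGetD c "url" ""), ("label", pvGetD c "text" "")]

-- A's output loop with its break on len(out) >= max_links
def outLoopA (ml : Int) : List (Int × List (String × String)) → List (List (String × String)) → List (List (String × String))
  | [], out => out
  | (_, c) :: rest, out =>
      if ml ≤ (out.length : Int) then out
      else outLoopA ml rest (out ++ [pvMkOut c])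

def choose_links_heuristic (candidates : List (List (String × String))) (base_url : String) (max_links : Int) : List (List (String × String)) :=
  let scored := candidates.foldl (fun scored c =>
    let u := PySem.Chars.strip ((pvGetD c "url" "").toList)
    if u = [] then scored
    else if pvRstripSlash u = pvRstripSlash base_url.toList then scored
    else
      let score := score_link_candidate ((pvGetD c "text" "").toList) u
      if score ≤ 0 then scored
      else scored ++ [(score, c)]) []
  outLoopA max_links (PySem.List.sorted scored (fun x => x.1) true) []

-- ===== PORT B =====
def score_link_candidate_alt (text url : List Char) : Int :=
  let hay := PySem.Chars.lower (text ++ [' '] ++ url)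
  ((pvKeywords.filter (fun kw => PySem.Chars.isIn kw.toList hay)).map (fun _ => (5 : Int))).sum
    - (if PySem.Chars.isIn ['p', 'd', 'f'] hay then 2 else 0)

def choose_links_heuristic_alt (candidates : List (List (String × String))) (base_url : String) (max_links : Int) : List (List (String × String)) :=
  let base := pvRstripSlash base_url.toList
  let buckets := candidates.foldl (fun bs c =>
    let u := PySem.Chars.strip ((pvGetD c "url" "").toList)
    if u = [] then bs
    else if pvRstripSlash u = base then bs
    else
      let s := score_link_candidate_alt ((pvGetD c "text" "").toList) u
      if 0 < s then bs.set s.toNat ((bs.getD s.toNat []) ++ [pvMkOut c]) else bs)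
    (List.replicate 71 ([] : List (List (String × String))))
  let ranked := (PySem.List.pyRange 70 0 (-1)).foldl (fun acc s => acc ++ buckets.getD s.toNat []) []
  ranked.take (max 0 max_links).toNat

-- ===== PRECONDITION & SPEC =====
def Spec_choose_links_heuristic (candidates : List (List (String × String))) (base_url : String) (max_links : Int) (out : List (List (String × String))) : Prop := out = choose_links_heuristic_alt candidates base_url max_links
instance (candidates : List (List (String × String))) (base_url : String) (max_links : Int) (out : List (List (String × String))) : Decidable (Spec_choose_links_heuristic candidates base_url max_links out) := by unfold Spec_choose_links_heuristic; infer_instance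

-- ===== CLAIM (what is proved, stated in full; the proofs are below) =====
def Claim_equal_choose_links_heuristic : Prop := ∀ (candidates : List (List (String × String))) (base_url : String) (max_links : Int), Dom_choose_links_heuristic candidates base_url max_links → Spec_choose_links_heuristic candidates base_url max_links (choose_links_heuristic candidates base_url max_links)

-- ===== LEMMAS AND PROOFS =====

-- score of a kept candidate (computed on the stripped url, as both Pythons do)
def pvScOf (c : List (String × String)) : Int :=
  score_link_candidate ((pvGetD c "text" "").toList) (PySem.Chars.strip ((pvGetD c "url" "").toList))

def pvEntryOf (c : List (String × String)) : Int × List (String × String) := (pvScOf c, c)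

-- the common filtering condition of both programs
def pvKeepP (base_url : String) (c : List (String × String)) : Bool :=
  let u := PySem.Chars.strip ((pvGetD c "url" "").toList)
  !decide (u = []) && !decide (pvRstripSlash u = pvRstripSlash base_url.toList) && decide (0 < pvScOf c)

-- the big-score group concatenation: [n, n-1, ..., 1]
def descList : Nat → List Int
  | 0 => []
  | n + 1 => ((n : Int) + 1) :: descList n

lemma mem_descList (n : Nat) (s : Int) : s ∈ descList n ↔ 1 ≤ s ∧ s ≤ n := by
  induction n with
  | zero => simp [descList]; omega
  | succ n ih => simp [descList, ih]; omega

lemma pyRange_desc : PySem.List.pyRange 70 0 (-1) = descList 70 := by decide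

lemma score_eq (text url : List Char) : score_link_candidate text url = score_link_candidate_alt text url := by
  simp only [score_link_candidate, score_link_candidate_alt]
  rw [PySem.List.foldl_if_eq_foldl_filter (f := fun (s : Int) _ => s + 5)]
  rw [PySem.List.foldl_add (g := fun _ => (5 : Int))]
  split <;> simp

lemma score_le (text url : List Char) : score_link_candidate text url ≤ 70 := by
  rw [score_eq]
  simp only [score_link_candidate_alt]
  have h := List.length_filter_le (fun kw => PySem.Chars.isIn kw.toList (PySem.Chars.lower (text ++ [' '] ++ url))) pvKeywords
  rw [PySem.List.sum_map_const_int]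
  have h14 : pvKeywords.length = 14 := by decide
  rw [h14] at h
  split <;> omega

-- both programs' step functions, rewritten through the common keep-predicate
lemma stepA_eq (base_url : String) :
    (fun (scored : List (Int × List (String × String))) c =>
      let u := PySem.Chars.strip ((pvGetD c "url" "").toList)
      if u = [] then scored
      else if pvRstripSlash u = pvRstripSlash base_url.toList then scored
      else
        let score := score_link_candidate ((pvGetD c "text" "").toList) u
        if score ≤ 0 then scored
        else scored ++ [(score, c)]) =
    (fun acc c => if pvKeepP base_url c then acc ++ [pvEntryOf c] else acc) := by
  funext acc c
  simp only [pvKeepP, pvEntryOf, pvScOf]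
  by_cases h1 : PySem.Chars.strip ((pvGetD c "url" "").toList) = [] <;>
    by_cases h2 : pvRstripSlash (PySem.Chars.strip ((pvGetD c "url" "").toList)) = pvRstripSlash base_url.toList <;>
    by_cases h3 : score_link_candidate ((pvGetD c "text" "").toList) (PySem.Chars.strip ((pvGetD c "url" "").toList)) ≤ 0 <;>
    simp [h1, h2, h3]

lemma stepB_eq (base_url : String) :
    (fun (bs : List (List (List (String × String)))) c =>
      let u := PySem.Chars.strip ((pvGetD c "url" "").toList)
      if u = [] then bs
      else if pvRstripSlash u = pvRstripSlash base_url.toList then bs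
      else
        let s := score_link_candidate_alt ((pvGetD c "text" "").toList) u
        if 0 < s then bs.set s.toNat ((bs.getD s.toNat []) ++ [pvMkOut c]) else bs) =
    (fun bs c => if pvKeepP base_url c then
        bs.set (pvScOf c).toNat ((bs.getD (pvScOf c).toNat []) ++ [pvMkOut c]) else bs) := by
  funext bs c
  simp only [pvKeepP, pvScOf, ← score_eq]
  by_cases h1 : PySem.Chars.strip ((pvGetD c "url" "").toList) = [] <;>
    by_cases h2 : pvRstripSlash (PySem.Chars.strip ((pvGetD c "url" "").toList)) = pvRstripSlash base_url.toList <;>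
    by_cases h3 : 0 < score_link_candidate ((pvGetD c "text" "").toList) (PySem.Chars.strip ((pvGetD c "url" "").toList)) <;>
    simp [h1, h2, h3]

lemma keep_pos {base_url : String} {c : List (String × String)} (h : pvKeepP base_url c = true) :
    0 < pvScOf c := by
  simp only [pvKeepP, Bool.and_eq_true, decide_eq_true_eq] at h
  exact h.2

lemma sc_le (c : List (String × String)) : pvScOf c ≤ 70 := score_le _ _

-- insertBy helpers
lemma insertBy_append_not_before {α : Type} (bef : α → α → Bool) (x : α) (as bs : List α)
    (h : ∀ y ∈ as, bef x y = false) :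
    PySem.List.insertBy bef x (as ++ bs) = as ++ PySem.List.insertBy bef x bs := by
  induction as with
  | nil => simp
  | cons a as ih =>
    have ha : bef x a = false := h a (by simp)
    simp only [List.cons_append, PySem.List.insertBy, ha]
    simp only [Bool.false_eq_true, if_false]
    rw [ih (fun y hy => h y (by simp [hy]))]

lemma insertBy_all_before {α : Type} (bef : α → α → Bool) (x : α) (ys : List α)
    (h : ∀ y ∈ ys, bef x y = true) :
    PySem.List.insertBy bef x ys = x :: ys := by
  cases ys with
  | nil => rfl
  | cons y ys => simp [PySem.List.insertBy, h y (by simp)]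

-- group concatenation for a list of scored pairs
def grp (n : Nat) (l : List (Int × List (String × String))) : List (Int × List (String × String)) :=
  (descList n).flatMap (fun s => l.filter (fun y => y.1 == s))

lemma mem_grp_key {n : Nat} {l : List (Int × List (String × String))} {y : Int × List (String × String)}
    (h : y ∈ grp n l) : 1 ≤ y.1 ∧ y.1 ≤ n := by
  simp only [grp, List.mem_flatMap, List.mem_filter, beq_iff_eq] at h
  obtain ⟨s, hs, _, hy⟩ := h
  rw [hy]
  exact (mem_descList n s).mp hs

lemma insert_grp (n : Nat) (l : List (Int × List (String × String))) (x : Int × List (String × String))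
    (h1 : 1 ≤ x.1) (h2 : x.1 ≤ n) :
    PySem.List.insertBy (fun a b => decide (b.1 < a.1)) x (grp n l) = grp n (l ++ [x]) := by
  induction n with
  | zero => omega
  | succ n ih =>
    simp only [grp, descList, List.flatMap_cons]
    by_cases hx : x.1 = (n : Int) + 1
    · -- x belongs to the top bucket; everything below has a strictly smaller key
      rw [insertBy_append_not_before _ _ _ _ (by
        intro y hy
        simp only [List.mem_filter, beq_iff_eq] at hy
        simp [hy.2, hx])]
      rw [insertBy_all_before _ _ _ (by
        intro y hy
        have := mem_grp_key (n := n) (l := l) (show y ∈ grp n l from hy)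
        simp only [decide_eq_true_eq]
        omega)]
      have hrest : (descList n).flatMap (fun s => (l ++ [x]).filter (fun y => y.1 == s)) =
          (descList n).flatMap (fun s => l.filter (fun y => y.1 == s)) := by
        apply List.flatMap_congr
        intro s hs
        have hb := (mem_descList n s).mp hs
        simp [List.filter_append, show ¬ (x.1 == s) = true by simp [hx]; omega]
      rw [hrest]
      simp [List.filter_append, show (x.1 == (n : Int) + 1) = true by simp [hx]]
    · -- x belongs to a lower bucket: skip the top one and recurse
      have hle : x.1 ≤ (n : Int) := by omega
      rw [insertBy_append_not_before _ _ _ _ (by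
        intro y hy
        simp only [List.mem_filter, beq_iff_eq] at hy
        simp only [decide_eq_false_iff_not, not_lt]
        omega)]
      rw [show PySem.List.insertBy (fun a b => decide (b.1 < a.1)) x
            ((descList n).flatMap fun s => l.filter (fun y => y.1 == s)) = grp n (l ++ [x]) from ih (by omega)]
      simp [grp, List.filter_append, show ¬ (x.1 == (n : Int) + 1) = true by simp [hx]]

lemma sorted_grp (l : List (Int × List (String × String)))
    (h : ∀ x ∈ l, 1 ≤ x.1 ∧ x.1 ≤ 70) :
    PySem.List.sorted l (fun x => x.1) true = grp 70 l := by
  rw [PySem.List.sorted_rev_eq_foldl_insertBy]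
  induction l using List.reverseRecOn with
  | nil => simp [grp]
  | append_singleton l x ih =>
    rw [List.foldl_append]
    simp only [List.foldl_cons, List.foldl_nil]
    rw [ih (fun y hy => h y (by simp [hy]))]
    exact insert_grp 70 l x (h x (by simp)).1 (h x (by simp)).2

-- getD of replicate
lemma getD_replicate_nil (k : Nat) :
    (List.replicate 71 ([] : List (List (String × String)))).getD k [] = [] := by
  simp only [List.getD_eq_getElem?_getD, List.getElem?_replicate]
  split <;> simp

lemma getD_set_of_lt {α : Type} (l : List α) (i j : Nat) (v d : α) (h : i < l.length) :
    (l.set i v).getD j d = if i = j then v else l.getD j d := by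
  simp only [List.getD_eq_getElem?_getD, List.getElem?_set, h]
  split <;> simp_all

-- B's bucket fold invariant: bucket k collects, in order, the kept candidates of score k
lemma buckets_inv (base_url : String) (l : List (List (String × String)))
    (bs : List (List (List (String × String)))) (hlen : bs.length = 71) (k : Nat) :
    (l.foldl (fun bs c => if pvKeepP base_url c then
        bs.set (pvScOf c).toNat ((bs.getD (pvScOf c).toNat []) ++ [pvMkOut c]) else bs) bs).getD k [] =
      bs.getD k [] ++ (((l.filter (pvKeepP base_url)).map pvEntryOf).filter (fun y => y.1 == (k : Int))).map (fun e => pvMkOut e.2) := by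
  induction l generalizing bs with
  | nil => simp
  | cons c l ih =>
    simp only [List.foldl_cons]
    by_cases hc : pvKeepP base_url c = true
    · have hpos := keep_pos hc
      have hle := sc_le c
      have hbnd : (pvScOf c).toNat < bs.length := by omega
      have hlen' : (bs.set (pvScOf c).toNat ((bs.getD (pvScOf c).toNat []) ++ [pvMkOut c])).length = 71 := by
        simp [hlen]
      rw [if_pos hc, ih _ hlen', getD_set_of_lt _ _ _ _ _ hbnd]
      by_cases hk : (pvScOf c).toNat = k
      · have hki : pvScOf c = (k : Int) := by omega
        simp [hc, pvEntryOf, hki]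
      · have hki : ¬ (pvScOf c = (k : Int)) := by omega
        simp [hc, hk, pvEntryOf, hki]
    · rw [if_neg hc, ih _ hlen]
      simp [hc]

lemma outLoopA_take (ml : Int) (l : List (Int × List (String × String))) (out : List (List (String × String))) :
    outLoopA ml l out = out ++ (l.map (fun e => pvMkOut e.2)).take (ml.toNat - out.length) := by
  induction l generalizing out with
  | nil => simp [outLoopA]
  | cons x rest ih =>
    obtain ⟨s, c⟩ := x
    simp only [outLoopA]
    by_cases h : ml ≤ (out.length : Int)
    · have : ml.toNat - out.length = 0 := by omega
      simp [h, this]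
    · have hd : ml.toNat - out.length = (ml.toNat - (out.length + 1)) + 1 := by
        simp only [not_le] at h; omega
      simp only [h, if_false, ih]
      rw [hd]
      simp [List.take_succ_cons, List.append_assoc]

-- ===== VERDICT (by name: the statement is the Claim_ definition above) =====
theorem choose_links_heuristic_spec : Claim_equal_choose_links_heuristic := by
  intro candidates base_url max_links _
  unfold Spec_choose_links_heuristic
  simp only [choose_links_heuristic, choose_links_heuristic_alt]
  rw [stepA_eq base_url, stepB_eq base_url,
      PySem.List.foldl_append_if (p := pvKeepP base_url) (f := pvEntryOf)]
  simp only [List.nil_append]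
  -- bounds on the kept scores
  have hbounds : ∀ x ∈ (candidates.filter (pvKeepP base_url)).map pvEntryOf, 1 ≤ x.1 ∧ x.1 ≤ 70 := by
    intro x hx
    simp only [List.mem_map, List.mem_filter] at hx
    obtain ⟨c, ⟨_, hkeep⟩, hxc⟩ := hx
    have := keep_pos hkeep
    have := sc_le c
    rw [← hxc]
    simp only [pvEntryOf]
    omega
  rw [outLoopA_take, sorted_grp _ hbounds]
  rw [pyRange_desc, PySem.List.foldl_append_eq_flatMap]
  have hbuck : (descList 70).flatMap (fun s =>
      (candidates.foldl (fun bs c => if pvKeepP base_url c then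
        bs.set (pvScOf c).toNat ((bs.getD (pvScOf c).toNat []) ++ [pvMkOut c]) else bs)
        (List.replicate 71 ([] : List (List (String × String))))).getD s.toNat []) =
      (descList 70).flatMap (fun s =>
        (((candidates.filter (pvKeepP base_url)).map pvEntryOf).filter (fun y => y.1 == s)).map (fun e => pvMkOut e.2)) := by
    apply List.flatMap_congr
    intro s hs
    have hb := (mem_descList 70 s).mp hs
    rw [buckets_inv base_url candidates _ (by simp) s.toNat, getD_replicate_nil]
    have : ((s.toNat : Nat) : Int) = s := by omega
    rw [this]
    simp
  rw [hbuck]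
  have hmax : (max 0 max_links).toNat = max_links.toNat - List.length ([] : List (List (String × String))) := by
    rcases le_total 0 max_links with h | h
    · simp [max_eq_right h]
    · simp [max_eq_left h, Int.toNat_of_nonpos h]
  rw [hmax]
  simp only [List.nil_append, grp, List.map_flatMap]
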